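-- pv_equiv track=rewrite | github.com/leo-zhang-93/adventOfCode | 2024/script_20241225.py | processLock
-- ===== SOURCE A (Python) =====
-- def processLock(grid):
--     res = []
--     for j in range(5):
--         tmp_cnt = 0
--         for i in range(1, 6):
--             if grid[i][j] == '#':
--                 tmp_cnt += 1
--             else:
--                 break
--         res.append(tmp_cnt)
--     return res
-- ===== SOURCE B (Python) =====
-- def processLock(grid):
--     # Single row-major pass with per-column active flags instead of A's
--     # per-column scans with break.
--     state = [(0, True)] * 5
--     for i in range(1, 6):
--         if not any(a for _, a in state):
--             break
--         row = grid[i]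
--         state = [((c + 1, True) if row[j] == '#' else (c, False)) if a else (c, a)
--                  for j, (c, a) in enumerate(state)]
--     return [c for c, _ in state]
-- ===== Notes on version B (the rewrite author's own statement) =====
-- stated objective: alternative
-- what changed: Replaces A's column-by-column top-down scans with an early break by a single row-major pass that rebuilds a per-column (count, active) state list each row and stops once every column is inactive.
import Mathlib
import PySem

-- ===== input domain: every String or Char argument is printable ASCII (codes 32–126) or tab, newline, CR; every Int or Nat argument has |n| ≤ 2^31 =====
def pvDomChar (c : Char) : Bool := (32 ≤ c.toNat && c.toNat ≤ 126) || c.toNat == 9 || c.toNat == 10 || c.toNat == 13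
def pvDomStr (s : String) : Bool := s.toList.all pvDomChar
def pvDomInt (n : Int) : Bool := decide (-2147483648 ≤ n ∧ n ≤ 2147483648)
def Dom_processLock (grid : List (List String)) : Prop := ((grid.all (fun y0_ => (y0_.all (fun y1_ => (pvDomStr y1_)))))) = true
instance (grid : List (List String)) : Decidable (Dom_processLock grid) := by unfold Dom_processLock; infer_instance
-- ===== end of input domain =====

-- B replaces A's column-by-column scans (inner break) by one row-major pass over
-- rows 1..5 maintaining a per-column (count, active) state list; same values, no speed claim.


-- ===== PORT A =====
-- inner 'for i in range(1, 6): if grid[i][j] == "#": tmp_cnt += 1 else: break'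
-- (a 'none' cell lookup is Python's IndexError; excluded by Pre_, the recursion just stops there)
def pvAcol (grid : List (List String)) (j : Int) : List Int → Int → Int
  | [], cnt => cnt
  | i :: is, cnt =>
    match (PySem.List.pyGet? grid i).bind (fun row => PySem.List.pyGet? row j) with
    | some s => if s == "#" then pvAcol grid j is (cnt + 1) else cnt
    | none => cnt

def processLock (grid : List (List String)) : List Int :=
  (PySem.List.pyRange 0 5 1).foldl
    (fun res j => res ++ [pvAcol grid j (PySem.List.pyRange 1 6 1) 0]) []

-- ===== PORT B =====
-- 'state = [((c + 1, True) if row[j] == "#" else (c, False)) if a else (c, a)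
--           for j, (c, a) in enumerate(state)]'
-- (a 'none' cell lookup is Python's IndexError; excluded by Pre_ for active columns)
def pvBrow (row : List String) (state : List (Int × Bool)) : List (Int × Bool) :=
  (PySem.List.enumerate state).map (fun p =>
    if p.2.2 then
      (if PySem.List.pyGet? row p.1 == some "#" then (p.2.1 + 1, true) else (p.2.1, false))
    else p.2)

-- 'for i in range(1, 6): if not any(...): break; row = grid[i]; state = …'
-- (row = grid[i] with grid[i] missing is Python's IndexError, excluded by Pre_ when a
-- column is still active; the port reads the empty row there)
def pvBrows (grid : List (List String)) : List Int → List (Int × Bool) → List (Int × Bool)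
  | [], st => st
  | i :: is, st =>
    if st.any (fun p => p.2) then
      pvBrows grid is (pvBrow ((PySem.List.pyGet? grid i).getD []) st)
    else st

def processLock_alt (grid : List (List String)) : List Int :=
  (pvBrows grid (PySem.List.pyRange 1 6 1) (List.replicate 5 (0, true))).map Prod.fst

-- ===== PRECONDITION & SPEC =====
def pvInRange (grid : List (List String)) (i j : Nat) : Bool :=
  ((grid[i]?).bind (fun row => row[j]?)).isSome
def pvHashAt (grid : List (List String)) (i j : Nat) : Bool :=
  ((grid[i]?).bind (fun row => row[j]?)) == some "#"
-- Exactly the inputs on which Python A returns: in each column j < 5, the top-down walk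
-- over rows 1..5 stays in range until it breaks at a non-'#' cell or finishes.
def Pre_processLock (grid : List (List String)) : Prop :=
  ∀ j < 5, ∀ i < 6, 1 ≤ i → (∀ k < i, 1 ≤ k → pvHashAt grid k j = true) →
    pvInRange grid i j = true
instance (grid : List (List String)) : Decidable (Pre_processLock grid) := by
  unfold Pre_processLock; infer_instance
def pvWitness_processLock : List (List String) :=
  [["#","#","#","#","#"], [".",".",".",".","."]]
def Spec_processLock (grid : List (List String)) (out : List Int) : Prop := out = processLock_alt grid
instance (grid : List (List String)) (out : List Int) : Decidable (Spec_processLock grid out) := by unfold Spec_processLock; infer_instance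

-- ===== CLAIM (what is proved, stated in full; the proofs are below) =====
def Claim_equal_processLock : Prop := ∀ (grid : List (List String)), Dom_processLock grid → Pre_processLock grid → Spec_processLock grid (processLock grid)

-- ===== LEMMAS AND PROOFS =====

-- cell hash as both ports see it (bind form and getD-row form agree)
def pvHash (grid : List (List String)) (i j : Int) : Bool :=
  PySem.List.pyGet? ((PySem.List.pyGet? grid i).getD []) j == some "#"

lemma pvHash_eq_bind (grid : List (List String)) (i j : Int) :
    pvHash grid i j =
      ((PySem.List.pyGet? grid i).bind (fun row => PySem.List.pyGet? row j) == some "#") := by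
  unfold pvHash
  cases h : PySem.List.pyGet? grid i with
  | none => simp [PySem.List.pyGet?]
  | some r => simp

-- length of the leading all-'#' run of column j along the given row indices
def pvLead (grid : List (List String)) (j : Int) : List Int → Int
  | [] => 0
  | i :: is => if pvHash grid i j then pvLead grid j is + 1 else 0

def pvAllH (grid : List (List String)) (j : Int) (l : List Int) : Bool :=
  l.all (fun i => pvHash grid i j)

lemma pvAcol_eq (grid : List (List String)) (j : Int) :
    ∀ (l : List Int) (c : Int), pvAcol grid j l c = c + pvLead grid j l := by
  intro l
  induction l with
  | nil => intro c; simp [pvAcol, pvLead]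
  | cons i is ih =>
    intro c
    rw [pvAcol, pvLead]
    cases hcell : (PySem.List.pyGet? grid i).bind (fun row => PySem.List.pyGet? row j) with
    | none =>
      have : pvHash grid i j = false := by rw [pvHash_eq_bind, hcell]; rfl
      simp [this]
    | some s =>
      have hh : pvHash grid i j = (s == "#") := by rw [pvHash_eq_bind, hcell]; simp
      by_cases hs : s = "#"
      · simp [hh, hs, ih]; ring
      · simp [hh, hs]

lemma pvLead_append (grid : List (List String)) (j : Int) (P Q : List Int) :
    pvLead grid j (P ++ Q) =
      pvLead grid j P + (if pvAllH grid j P then pvLead grid j Q else 0) := by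
  induction P with
  | nil => simp [pvLead, pvAllH]
  | cons p P ih =>
    by_cases hp : pvHash grid p j = true
    · simp [pvLead, pvAllH, hp, ih, pvAllH]
      split <;> ring
    · simp [pvLead, pvAllH, hp]

lemma pvAllH_append (grid : List (List String)) (j : Int) (P Q : List Int) :
    pvAllH grid j (P ++ Q) = (pvAllH grid j P && pvAllH grid j Q) := by
  simp [pvAllH, List.all_append]

-- B's state after having consumed the rows P, column by column
def pvStOf (grid : List (List String)) (P : List Int) : List (Int × Bool) :=
  [(pvLead grid 0 P, pvAllH grid 0 P), (pvLead grid 1 P, pvAllH grid 1 P),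
   (pvLead grid 2 P, pvAllH grid 2 P), (pvLead grid 3 P, pvAllH grid 3 P),
   (pvLead grid 4 P, pvAllH grid 4 P)]

lemma pvScalar (grid : List (List String)) (i j : Int) (P : List Int) :
    (if pvAllH grid j P = true then
       (if PySem.List.pyGet? ((PySem.List.pyGet? grid i).getD []) j = some "#" then
          (pvLead grid j P + 1, true)
        else (pvLead grid j P, false))
     else (pvLead grid j P, pvAllH grid j P)) =
      (pvLead grid j (P ++ [i]), pvAllH grid j (P ++ [i])) := by
  rw [pvLead_append, pvAllH_append]
  cases ha : pvAllH grid j P <;>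
    by_cases hi : PySem.List.pyGet? ((PySem.List.pyGet? grid i).getD []) j = some "#" <;>
    simp [pvLead, pvAllH, pvHash, hi]

lemma pvBrow_stOf (grid : List (List String)) (i : Int) (P : List Int) :
    pvBrow ((PySem.List.pyGet? grid i).getD []) (pvStOf grid P) =
      pvStOf grid (P ++ [i]) := by
  unfold pvBrow pvStOf
  simp only [PySem.List.enumerate_cons, PySem.List.enumerate_nil, List.map_cons, List.map_nil]
  norm_num
  refine ⟨?_, ?_, ?_, ?_, ?_⟩ <;>
    exact pvScalar grid i _ P

lemma pvLead_of_not_allH (grid : List (List String)) (j : Int) (P Q : List Int)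
    (h : pvAllH grid j P = false) : pvLead grid j (P ++ Q) = pvLead grid j P := by
  rw [pvLead_append, h]; simp

lemma pvBrows_inv (grid : List (List String)) :
    ∀ (S P : List Int), pvBrows grid S (pvStOf grid P) = pvStOf grid (P ++ S) := by
  intro S
  induction S with
  | nil => intro P; simp [pvBrows]
  | cons i S ih =>
    intro P
    rw [pvBrows]
    by_cases hb : (pvStOf grid P).any (fun p => p.2) = true
    · rw [if_pos hb, pvBrow_stOf, ih]
      simp
    · rw [if_neg hb]
      have hall : ∀ j : Int, j = 0 ∨ j = 1 ∨ j = 2 ∨ j = 3 ∨ j = 4 →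
          pvAllH grid j P = false := by
        intro j hj
        simp [pvStOf, List.any] at hb
        rcases hj with h | h | h | h | h <;> subst h <;> tauto
      unfold pvStOf
      have leadEq : ∀ j : Int, j = 0 ∨ j = 1 ∨ j = 2 ∨ j = 3 ∨ j = 4 →
          pvLead grid j P = pvLead grid j (P ++ i :: S) ∧
          pvAllH grid j P = pvAllH grid j (P ++ i :: S) := by
        intro j hj
        have hf := hall j hj
        constructor
        · rw [pvLead_of_not_allH grid j P _ hf]
        · rw [pvAllH_append, hf]; simp
      have h0 := leadEq 0 (by tauto); have h1 := leadEq 1 (by tauto)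
      have h2 := leadEq 2 (by tauto); have h3 := leadEq 3 (by tauto)
      have h4 := leadEq 4 (by tauto)
      rw [h0.1, h0.2, h1.1, h1.2, h2.1, h2.2, h3.1, h3.2, h4.1, h4.2]

lemma pvRange05 : PySem.List.pyRange 0 5 1 = [0, 1, 2, 3, 4] := by decide
lemma pvRange16 : PySem.List.pyRange 1 6 1 = [1, 2, 3, 4, 5] := by decide

lemma processLock_eq_lead (grid : List (List String)) :
    processLock grid =
      [pvLead grid 0 [1,2,3,4,5], pvLead grid 1 [1,2,3,4,5], pvLead grid 2 [1,2,3,4,5],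
       pvLead grid 3 [1,2,3,4,5], pvLead grid 4 [1,2,3,4,5]] := by
  unfold processLock
  rw [pvRange05, pvRange16]
  simp [List.foldl, pvAcol_eq]

lemma processLock_alt_eq_lead (grid : List (List String)) :
    processLock_alt grid =
      [pvLead grid 0 [1,2,3,4,5], pvLead grid 1 [1,2,3,4,5], pvLead grid 2 [1,2,3,4,5],
       pvLead grid 3 [1,2,3,4,5], pvLead grid 4 [1,2,3,4,5]] := by
  unfold processLock_alt
  rw [pvRange16]
  have h0 : List.replicate 5 ((0 : Int), true) = pvStOf grid [] := by
    simp [pvStOf, pvLead, pvAllH, List.replicate]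
  rw [h0, pvBrows_inv grid [1,2,3,4,5] []]
  simp [pvStOf]

-- ===== VERDICT (by name: the statement is the Claim_ definition above) =====
theorem processLock_spec : Claim_equal_processLock := by
  intro grid _ _
  unfold Spec_processLock
  rw [processLock_eq_lead, processLock_alt_eq_lead]
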